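-- pv_equiv track=rewrite | github.com/KanakV/PDSA | OPPE practice/domino_solitaire.py | max_tiling
-- ===== SOURCE A (Python) =====
-- def max_tiling(n, grid):
--
--     max_score = [vertical(grid, 0)] * n
--     if n == 1:
--         return max_score[0]
--
--     max_score[1] = max(max_score[0] + vertical(grid, 1), horizontal(grid, 1))
--
--     for i in range(2, n):
--         max_score[i] = max(max_score[i-1]+vertical(grid,i),
--             max_score[i-2] + horizontal(grid, i))
--
--     return max(max_score)
--
-- def horizontal(grid, end):
--     return abs(grid[0][end-1] - grid[0][end]) + abs(grid[1][end-1] - grid[1][end])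
--
-- def vertical(grid, i):
--     return abs(grid[0][i] - grid[1][i])
-- ===== SOURCE B (Python) =====
-- def max_tiling(n, grid):
--     # Top-down memoized recursion over the column index instead of a bottom-up
--     # DP table: f(i) = best score for columns 0..i, cached in a dict; the
--     # answer is the max of f(i) over all columns.
--     memo = {}
--
--     def f(i):
--         if i in memo:
--             return memo[i]
--         if i == 0:
--             r = vertical(grid, 0)
--         elif i == 1:
--             r = max(f(0) + vertical(grid, 1), horizontal(grid, 1))
--         else:
--             r = max(f(i - 1) + vertical(grid, i), f(i - 2) + horizontal(grid, i))
--         memo[i] = r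
--         return r
--
--     return max(f(i) for i in range(n))
--
--
-- def horizontal(grid, end):
--     return abs(grid[0][end - 1] - grid[0][end]) + abs(grid[1][end - 1] - grid[1][end])
--
--
-- def vertical(grid, i):
--     return abs(grid[0][i] - grid[1][i])
-- ===== Notes on version B (the rewrite author's own statement) =====
-- stated objective: alternative
-- what changed: Replaces the bottom-up DP table filled by an index loop with a top-down memoized recursion f(i) cached in a dict, aggregating the answer as max of f(i) over all columns.
import Mathlib
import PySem

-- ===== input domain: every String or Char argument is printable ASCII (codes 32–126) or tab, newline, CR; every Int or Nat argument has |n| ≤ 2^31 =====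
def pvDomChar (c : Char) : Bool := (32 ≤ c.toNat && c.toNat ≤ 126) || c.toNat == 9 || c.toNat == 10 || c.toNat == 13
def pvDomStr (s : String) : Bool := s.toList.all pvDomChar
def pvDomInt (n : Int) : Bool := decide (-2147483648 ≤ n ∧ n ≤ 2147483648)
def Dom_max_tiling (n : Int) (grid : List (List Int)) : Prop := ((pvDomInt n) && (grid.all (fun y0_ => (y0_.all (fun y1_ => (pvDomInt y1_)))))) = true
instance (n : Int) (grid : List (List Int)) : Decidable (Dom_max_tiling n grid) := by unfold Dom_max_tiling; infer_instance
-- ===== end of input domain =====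

-- B replaces A's bottom-up DP table with a top-down memoized recursion over the
-- column index, aggregating the answer as max over all f(i); returns agree on Pre_.

-- ===== PORT A =====
def vertA (grid : List (List Int)) (i : Int) : Int :=
  |PySem.List.pyGetD (PySem.List.pyGetD grid 0 []) i 0 - PySem.List.pyGetD (PySem.List.pyGetD grid 1 []) i 0|

def horizA (grid : List (List Int)) (e : Int) : Int :=
  |PySem.List.pyGetD (PySem.List.pyGetD grid 0 []) (e-1) 0 - PySem.List.pyGetD (PySem.List.pyGetD grid 0 []) e 0|
  + |PySem.List.pyGetD (PySem.List.pyGetD grid 1 []) (e-1) 0 - PySem.List.pyGetD (PySem.List.pyGetD grid 1 []) e 0|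

def max_tiling (n : Int) (grid : List (List Int)) : Int :=
  let ms0 := List.replicate n.toNat (vertA grid 0)
  if n = 1 then PySem.List.pyGetD ms0 0 0
  else
    let ms1 := PySem.List.pySetD ms0 1 (max (PySem.List.pyGetD ms0 0 0 + vertA grid 1) (horizA grid 1))
    let msf := (PySem.List.pyRange 2 n 1).foldl
      (fun ms i => PySem.List.pySetD ms i
        (max (PySem.List.pyGetD ms (i-1) 0 + vertA grid i)
             (PySem.List.pyGetD ms (i-2) 0 + horizA grid i))) ms1
    (PySem.List.max? msf (fun y => y)).getD 0

-- ===== PORT B =====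
def vertB (grid : List (List Int)) (i : Int) : Int :=
  |PySem.List.pyGetD (PySem.List.pyGetD grid 0 []) i 0 - PySem.List.pyGetD (PySem.List.pyGetD grid 1 []) i 0|

def horizB (grid : List (List Int)) (i : Int) : Int :=
  |PySem.List.pyGetD (PySem.List.pyGetD grid 0 []) (i-1) 0 - PySem.List.pyGetD (PySem.List.pyGetD grid 0 []) i 0|
  + |PySem.List.pyGetD (PySem.List.pyGetD grid 1 []) (i-1) 0 - PySem.List.pyGetD (PySem.List.pyGetD grid 1 []) i 0|

-- f(i) with its memo dict threaded through (the Python closure mutates `memo`)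
def fB (grid : List (List Int)) : Nat → PySem.Dict Int Int → Int × PySem.Dict Int Int
  | 0, memo =>
    match memo.get? (0 : Int) with
    | some r => (r, memo)
    | none =>
      let r := vertB grid 0
      (r, memo.insert (0 : Int) r)
  | 1, memo =>
    match memo.get? (1 : Int) with
    | some r => (r, memo)
    | none =>
      let p0 := fB grid 0 memo
      let r := max (p0.1 + vertB grid 1) (horizB grid 1)
      (r, p0.2.insert (1 : Int) r)
  | (k+2), memo =>
    match memo.get? ((k : Int) + 2) with
    | some r => (r, memo)
    | none =>
      let p1 := fB grid (k+1) memo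
      let p2 := fB grid k p1.2
      let r := max (p1.1 + vertB grid ((k : Int) + 2)) (p2.1 + horizB grid ((k : Int) + 2))
      (r, p2.2.insert ((k : Int) + 2) r)

-- body of `max(f(i) for i in range(n))`: collect f(i) in order, threading the memo
def stepB (grid : List (List Int)) (st : List Int × PySem.Dict Int Int) (i : Int) :
    List Int × PySem.Dict Int Int :=
  let p := fB grid i.toNat st.2
  (st.1 ++ [p.1], p.2)

def max_tiling_alt (n : Int) (grid : List (List Int)) : Int :=
  let st := (PySem.List.pyRange 0 n 1).foldl (stepB grid) ([], PySem.Dict.empty)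
  (PySem.List.max? st.1 (fun y => y)).getD 0

-- ===== PRECONDITION & SPEC =====
-- Pre_: exactly the inputs on which A returns (n ≥ 1, at least two rows, both rows long enough);
-- elsewhere A raises IndexError (or ValueError from max([])).
def Pre_max_tiling (n : Int) (grid : List (List Int)) : Prop :=
  1 ≤ n ∧ 2 ≤ grid.length ∧ n ≤ (grid.getD 0 []).length ∧ n ≤ (grid.getD 1 []).length
instance (n : Int) (grid : List (List Int)) : Decidable (Pre_max_tiling n grid) := by
  unfold Pre_max_tiling; infer_instance

def pvWitness_max_tiling : Int × List (List Int) := (3, [[1, 5, 2], [4, 0, 7]])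

def Spec_max_tiling (n : Int) (grid : List (List Int)) (out : Int) : Prop := out = max_tiling_alt n grid
instance (n : Int) (grid : List (List Int)) (out : Int) : Decidable (Spec_max_tiling n grid out) := by
  unfold Spec_max_tiling; infer_instance

-- ===== CLAIM (what is proved, stated in full; the proofs are below) =====
def Claim_equal_max_tiling : Prop := ∀ (n : Int) (grid : List (List Int)),
  Dom_max_tiling n grid → Pre_max_tiling n grid → Spec_max_tiling n grid (max_tiling n grid)

-- ===== LEMMAS AND PROOFS =====

-- the pure DP recurrence both programs compute
def dpPure (v h : Int → Int) : Nat → Int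
  | 0 => v 0
  | 1 => max (dpPure v h 0 + v 1) (h 1)
  | (k+2) => max (dpPure v h (k+1) + v ((k : Int) + 2)) (dpPure v h k + h ((k : Int) + 2))

-- every entry of the memo is a correct dp value
def MemoOK (grid : List (List Int)) (memo : PySem.Dict Int Int) : Prop :=
  ∀ (k : Nat) (r : Int), memo.get? (k : Int) = some r → r = dpPure (vertB grid) (horizB grid) k

lemma memoOK_empty (grid : List (List Int)) : MemoOK grid PySem.Dict.empty := by
  intro k r hk
  simp [PySem.Dict.get?_empty] at hk

lemma memoOK_insert (grid : List (List Int)) (memo : PySem.Dict Int Int)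
    (hm : MemoOK grid memo) (j : Nat) :
    MemoOK grid (memo.insert (j : Int) (dpPure (vertB grid) (horizB grid) j)) := by
  intro k r hk
  rw [PySem.Dict.get?_insert] at hk
  by_cases h : (k : Int) = (j : Int)
  · have hkj : k = j := by exact_mod_cast h
    rw [if_pos h] at hk
    cases hk
    rw [hkj]
  · rw [if_neg h] at hk
    exact hm k r hk

lemma fB_spec (grid : List (List Int)) : ∀ (i : Nat) (memo : PySem.Dict Int Int),
    MemoOK grid memo →
    (fB grid i memo).1 = dpPure (vertB grid) (horizB grid) i ∧ MemoOK grid (fB grid i memo).2 := by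
  intro i
  induction i using Nat.strong_induction_on with
  | _ i ih =>
    intro memo hm
    match i with
    | 0 =>
      cases hg : memo.get? (0 : Int) with
      | some r =>
        have := hm 0 r (by simpa using hg)
        simp [fB, hg, this]
        exact hm
      | none =>
        refine ⟨by simp [fB, hg, dpPure], ?_⟩
        simp only [fB, hg]
        have := memoOK_insert grid memo hm 0
        simpa [dpPure] using this
    | 1 =>
      cases hg : memo.get? (1 : Int) with
      | some r =>
        have := hm 1 r (by simpa using hg)
        simp [fB, hg, this]
        exact hm
      | none =>
        obtain ⟨h0, hmem0⟩ := ih 0 (by omega) memo hm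
        have heq : fB grid 1 memo
            = (max ((fB grid 0 memo).1 + vertB grid 1) (horizB grid 1),
               (fB grid 0 memo).2.insert (1 : Int)
                 (max ((fB grid 0 memo).1 + vertB grid 1) (horizB grid 1))) := by
          conv_lhs => rw [fB]
          rw [hg]
        refine ⟨?_, ?_⟩
        · rw [heq, h0]
          rfl
        · rw [heq]
          have := memoOK_insert grid (fB grid 0 memo).2 hmem0 1
          simpa [dpPure, h0] using this
    | (k+2) =>
      cases hg : memo.get? ((k : Int) + 2) with
      | some r =>
        have hc : ((k + 2 : Nat) : Int) = (k : Int) + 2 := by push_cast; ring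
        have := hm (k+2) r (by rw [hc]; exact hg)
        simp [fB, hg, this]
        exact hm
      | none =>
        obtain ⟨h1, hmem1⟩ := ih (k+1) (by omega) memo hm
        obtain ⟨h2, hmem2⟩ := ih k (by omega) (fB grid (k+1) memo).2 hmem1
        have heq : fB grid (k+2) memo
            = (max ((fB grid (k+1) memo).1 + vertB grid ((k : Int) + 2))
                   ((fB grid k (fB grid (k+1) memo).2).1 + horizB grid ((k : Int) + 2)),
               (fB grid k (fB grid (k+1) memo).2).2.insert ((k : Int) + 2)
                 (max ((fB grid (k+1) memo).1 + vertB grid ((k : Int) + 2))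
                      ((fB grid k (fB grid (k+1) memo).2).1 + horizB grid ((k : Int) + 2)))) := by
          conv_lhs => rw [fB]
          rw [hg]
        refine ⟨?_, ?_⟩
        · rw [heq, h1, h2]
          rfl
        · rw [heq]
          have := memoOK_insert grid (fB grid k (fB grid (k+1) memo).2).2 hmem2 (k+2)
          have hc : ((k + 2 : Nat) : Int) = (k : Int) + 2 := by push_cast; ring
          rw [hc] at this
          simpa [dpPure, h1, h2] using this

lemma B_fold (grid : List (List Int)) (m : Nat) :
    ((PySem.List.pyRange 0 (m : Int) 1).foldl (stepB grid) ([], PySem.Dict.empty)).1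
      = (List.range m).map (dpPure (vertB grid) (horizB grid))
    ∧ MemoOK grid ((PySem.List.pyRange 0 (m : Int) 1).foldl (stepB grid) ([], PySem.Dict.empty)).2 := by
  induction m with
  | zero =>
    rw [show ((0 : Nat) : Int) = 0 by rfl, PySem.List.pyRange_one_eq_nil le_rfl]
    exact ⟨rfl, memoOK_empty grid⟩
  | succ m ih =>
    obtain ⟨hv, hm⟩ := ih
    have hc : (((m + 1 : Nat)) : Int) = (m : Int) + 1 := by push_cast; ring
    rw [hc, PySem.List.pyRange_one_succ_right (by positivity : (0 : Int) ≤ (m : Int)),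
        List.foldl_append]
    simp only [List.foldl_cons, List.foldl_nil]
    obtain ⟨hf1, hf2⟩ := fB_spec grid ((m : Int)).toNat _ hm
    have ht : ((m : Int)).toNat = m := by omega
    rw [ht] at hf1 hf2
    constructor
    · simp only [stepB, hv, List.range_succ, List.map_append, List.map_cons, List.map_nil]
      rw [ht, hf1]
    · exact hf2

-- A-side: the Python list after the loop, elementwise
def dpPair (v h : Int → Int) : Nat → Int × Int
  | 0 => (0, v 0)
  | k+1 => ((dpPair v h k).2, max ((dpPair v h k).2 + v (k+1)) ((dpPair v h k).1 + h (k+1)))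

lemma dpPair_snd_eq (v h : Int → Int) : ∀ k, (dpPair v h k).2 = dpPure v h k := by
  intro k
  induction k using Nat.strong_induction_on with
  | _ k ih =>
    match k with
    | 0 => rfl
    | 1 =>
      show max ((dpPair v h 0).2 + v _) ((dpPair v h 0).1 + h _) = _
      simp [dpPair, dpPure]
    | (j+2) =>
      show max ((dpPair v h (j+1)).2 + v _) ((dpPair v h (j+1)).1 + h _) = _
      have e1 : (dpPair v h (j+1)).1 = (dpPair v h j).2 := rfl
      rw [e1, ih (j+1) (by omega), ih j (by omega)]
      have hc : ((j : Int) + 1) + 1 = (j : Int) + 2 := by ring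
      simp only [dpPure]
      push_cast
      ring_nf

lemma getD_set_int (xs : List Int) (i k : Nat) (v : Int) :
    (xs.set i v).getD k 0 = if i = k ∧ i < xs.length then v else xs.getD k 0 := by
  simp only [List.getD_eq_getElem?_getD, List.getElem?_set]
  by_cases h1 : i = k
  · subst h1
    by_cases h2 : i < xs.length <;> simp [h2]
  · simp [h1]

lemma A_inv (grid : List (List Int)) (N : Nat) (hN : 2 ≤ N) (j : Nat) (hm : j + 2 ≤ N) :
    (((PySem.List.pyRange 2 ((j:Int)+2) 1).foldl
      (fun ms i => PySem.List.pySetD ms i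
        (max (PySem.List.pyGetD ms (i-1) 0 + vertA grid i)
             (PySem.List.pyGetD ms (i-2) 0 + horizA grid i)))
      (PySem.List.pySetD (List.replicate N (vertA grid 0)) 1
        (max (PySem.List.pyGetD (List.replicate N (vertA grid 0)) 0 0 + vertA grid 1)
             (horizA grid 1)))).length = N)
  ∧ ∀ k : Nat, k < N →
      ((PySem.List.pyRange 2 ((j:Int)+2) 1).foldl
      (fun ms i => PySem.List.pySetD ms i
        (max (PySem.List.pyGetD ms (i-1) 0 + vertA grid i)
             (PySem.List.pyGetD ms (i-2) 0 + horizA grid i)))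
      (PySem.List.pySetD (List.replicate N (vertA grid 0)) 1
        (max (PySem.List.pyGetD (List.replicate N (vertA grid 0)) 0 0 + vertA grid 1)
             (horizA grid 1)))).getD k 0
      = if k < j+2 then (dpPair (vertA grid) (horizA grid) k).2 else vertA grid 0 := by
  induction j with
  | zero =>
    have hrange : PySem.List.pyRange 2 (((0:Nat):Int)+2) 1 = [] := by
      rw [show (((0:Nat):Int)+2) = 2 by norm_num]
      exact PySem.List.pyRange_one_eq_nil le_rfl
    rw [hrange]
    simp only [List.foldl_nil]
    rw [PySem.List.pySetD_of_nonneg _ _ (by norm_num)]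
    constructor
    · simp
    · intro k hk
      rw [show ((1:Int)).toNat = 1 from rfl, getD_set_int]
      simp only [List.length_replicate]
      rcases Nat.lt_or_ge k 2 with hk2 | hk2
      · interval_cases k
        · simp [dpPair, (by omega : 0 < N)]
        · have h1N : (1:Nat) < N := by omega
          simp [dpPair, h1N, PySem.List.pyGetD_zero, (by omega : 0 < N)]
      · have h1 : ¬ ((1:Nat) = k ∧ 1 < N) := by omega
        have h2 : ¬ (k < 0 + 2) := by omega
        simp only [if_neg h1, if_neg h2]
        exact List.getD_replicate _ hk
  | succ j ih =>
    have hm' : j + 2 ≤ N := by omega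
    obtain ⟨hlen, hget⟩ := ih hm'
    have hc : (((j+1:Nat)):Int)+2 = ((j:Int)+2)+1 := by omega
    rw [hc, PySem.List.pyRange_one_succ_right (show (2:Int) ≤ (j:Int)+2 by omega),
        List.foldl_append]
    simp only [List.foldl_cons, List.foldl_nil]
    generalize hL : (PySem.List.pyRange 2 ((j:Int)+2) 1).foldl
      (fun ms i => PySem.List.pySetD ms i
        (max (PySem.List.pyGetD ms (i-1) 0 + vertA grid i)
             (PySem.List.pyGetD ms (i-2) 0 + horizA grid i)))
      (PySem.List.pySetD (List.replicate N (vertA grid 0)) 1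
        (max (PySem.List.pyGetD (List.replicate N (vertA grid 0)) 0 0 + vertA grid 1)
             (horizA grid 1))) = L at hlen hget ⊢
    have e1 : (j:Int)+2-1 = ((j+1:Nat):Int) := by omega
    have e2 : (j:Int)+2-2 = ((j:Nat):Int) := by omega
    rw [e1, e2, PySem.List.pyGetD_natCast, PySem.List.pyGetD_natCast]
    rw [hget (j+1) (by omega), hget j (by omega)]
    rw [if_pos (by omega : j+1 < j+2), if_pos (by omega : j < j+2)]
    have hv : max ((dpPair (vertA grid) (horizA grid) (j+1)).2 + vertA grid ((j:Int)+2))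
        ((dpPair (vertA grid) (horizA grid) j).2 + horizA grid ((j:Int)+2))
        = (dpPair (vertA grid) (horizA grid) (j+2)).2 := by
      have hc2 : ((j:Int)+2) = (((j+2:Nat)):Int) := by omega
      rw [hc2]
      simp only [dpPair]
      rw [show ((((j+2:Nat)):Int)) = (j:Int)+1+1 by omega,
          show ((((j+1:Nat)):Int)) = (j:Int)+1 by omega]
    rw [hv, PySem.List.pySetD_of_nonneg _ _ (by omega : (0:Int) ≤ (j:Int)+2)]
    have ht : ((j:Int)+2).toNat = j+2 := by omega
    rw [ht]
    constructor
    · simp [hlen]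
    · intro k hk
      rw [getD_set_int, hlen]
      by_cases hkj : k = j + 2
      · rw [if_pos ⟨hkj.symm, (by omega : j+2 < N)⟩, hkj,
            if_pos (by omega : j+2 < j+1+2)]
      · have h1 : ¬ (j+2 = k ∧ j+2 < N) := by omega
        rw [if_neg h1, hget k hk]
        by_cases hlt : k < j + 2
        · rw [if_pos hlt, if_pos (by omega : k < j+1+2)]
        · rw [if_neg hlt, if_neg (by omega : ¬ k < j+1+2)]

-- ===== VERDICT (by name: the statement is the Claim_ definition above) =====
theorem max_tiling_spec : Claim_equal_max_tiling := by
  intro n grid _ hPre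
  obtain ⟨hn1, -, -, -⟩ := hPre
  unfold Spec_max_tiling
  have hveq : vertB = vertA := rfl
  have hheq : horizB = horizA := rfl
  set N := n.toNat with hNdef
  have hnN : n = (N:Int) := by omega
  -- B side: the collected values are exactly the dp values in order
  have hB : max_tiling_alt n grid
      = (PySem.List.max? ((List.range N).map (dpPure (vertA grid) (horizA grid))) (fun y => y)).getD 0 := by
    obtain ⟨hv, -⟩ := B_fold grid N
    rw [hnN]
    simp only [max_tiling_alt, hv, hveq, hheq]
  rw [hB]
  by_cases h1 : n = 1
  · have hN1 : N = 1 := by omega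
    rw [hN1]
    subst h1
    simp [max_tiling, PySem.List.max?_id_cons, dpPure, vertA, PySem.List.pyGetD_zero]
  · -- n ≥ 2
    have hN2 : 2 ≤ N := by omega
    obtain ⟨hlen, hget⟩ := A_inv grid N hN2 (N-2) (by omega)
    rw [show (((N-2:Nat)):Int)+2 = n by omega] at hlen hget
    unfold max_tiling
    rw [if_neg h1]
    simp only [← hNdef]
    generalize hM : (PySem.List.pyRange 2 n 1).foldl
      (fun ms i => PySem.List.pySetD ms i
        (max (PySem.List.pyGetD ms (i-1) 0 + vertA grid i)
             (PySem.List.pyGetD ms (i-2) 0 + horizA grid i)))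
      (PySem.List.pySetD (List.replicate N (vertA grid 0)) 1
        (max (PySem.List.pyGetD (List.replicate N (vertA grid 0)) 0 0 + vertA grid 1)
             (horizA grid 1))) = msf at hlen hget ⊢
    have hlist : msf = (List.range N).map (dpPure (vertA grid) (horizA grid)) := by
      apply List.ext_getElem
      · rw [hlen]; simp
      · intro k h1' h2'
        have hkN : k < N := by rw [← hlen]; exact h1'
        rw [← List.getD_eq_getElem msf 0 h1']
        rw [hget k hkN, if_pos (by omega : k < (N-2)+2)]
        simp only [List.getElem_map, List.getElem_range]
        exact dpPair_snd_eq (vertA grid) (horizA grid) k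
    rw [hlist]
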